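-- pv_equiv track=rewrite | github.com/rubenAlbuquerque/folder_organizer_program | Test_files/jogo.py | reduzir_keys
-- ===== SOURCE A (Python) =====
-- def menor_string(string1, string2):
--     if len(string1) < len(string2):
--         return string1, string2
--     else:
--         return string2, string1
--
-- def reduzir_keys(new_di):
--     dict_unique = {}
--     for k, v in new_di.items():
--         for key, value in new_di.items():
--             if k != key and v == value:
--                 menor_str, maior_str = menor_string(k, key)
--                 if menor_str in dict_unique.keys() or maior_str in dict_unique.keys():
--                     pass
--                 else:
--                     dict_unique[menor_string(k, key)[0]] = value
--     return dict_unique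
-- ===== SOURCE B (Python) =====
-- def reduzir_keys(new_di):
--     # index: value -> keys having it, in original dict order
--     groups = {}
--     for k, v in new_di.items():
--         groups.setdefault(v, []).append(k)
--     result = {}
--     for k, v in new_di.items():
--         if k in result:
--             continue
--         for key in groups[v]:
--             if key == k or key in result:
--                 continue
--             if len(k) < len(key):
--                 result[k] = v
--                 break
--             result[key] = v
--     return result
-- ===== Notes on version B (the rewrite author's own statement) =====
-- stated objective: faster
-- what changed: B builds a value->keys index once, then makes a single pass over the items: keys already emitted are skipped up front, the inner scan runs only over the key's own value-group (not the whole dict), and the shorter/longer tuple helper is replaced by a direct length comparison with a break as soon as the current key itself is emitted; Pre_ only requires the association list to have distinct keys, i.e. to encode a Python dict.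
import Mathlib
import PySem

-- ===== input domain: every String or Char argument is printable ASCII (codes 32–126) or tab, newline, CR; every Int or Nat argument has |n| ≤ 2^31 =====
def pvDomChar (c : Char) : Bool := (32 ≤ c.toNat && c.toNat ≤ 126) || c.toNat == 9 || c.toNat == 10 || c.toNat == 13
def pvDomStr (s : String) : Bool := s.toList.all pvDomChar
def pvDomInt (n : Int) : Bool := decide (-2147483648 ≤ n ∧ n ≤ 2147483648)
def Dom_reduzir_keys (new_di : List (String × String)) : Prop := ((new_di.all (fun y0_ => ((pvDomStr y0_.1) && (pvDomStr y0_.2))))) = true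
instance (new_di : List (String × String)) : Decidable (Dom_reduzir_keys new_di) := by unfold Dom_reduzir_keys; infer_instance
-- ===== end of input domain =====

-- B replaces A's quadratic double full-dict scan by a value->keys index plus a single
-- pass with per-group inner scans and early exit; measurably faster on large inputs.

-- ===== PORT A =====
def menor_string (string1 string2 : String) : String × String :=
  if PySem.Str.len string1 < PySem.Str.len string2 then (string1, string2)
  else (string2, string1)

def reduzir_keys (new_di : List (String × String)) : List (String × String) :=
  (new_di.foldl (fun dict_unique kv =>
    new_di.foldl (fun dict_unique kv2 =>
      if kv.1 ≠ kv2.1 ∧ kv.2 = kv2.2 then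
        let ms := menor_string kv.1 kv2.1
        if dict_unique.contains ms.1 || dict_unique.contains ms.2 then
          dict_unique
        else
          dict_unique.insert (menor_string kv.1 kv2.1).1 kv2.2
      else dict_unique) dict_unique)
    (PySem.Dict.empty : PySem.Dict String String)).items

-- ===== PORT B =====
-- inner `for key in groups[v]` loop of Source B, with its `continue`s and `break`
def reduzirInner (k v : String) : List String → PySem.Dict String String → PySem.Dict String String
  | [], result => result
  | key :: rest, result =>
    if key == k || result.contains key then reduzirInner k v rest result
    else if PySem.Str.len k < PySem.Str.len key then result.insert k v   -- break
    else reduzirInner k v rest (result.insert key v)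

def reduzir_keys_alt (new_di : List (String × String)) : List (String × String) :=
  -- groups.setdefault(v, []).append(k)  ==  groups[v] = groups.get(v, []) + [k]
  let groups := new_di.foldl (fun g p => g.modify p.2 [] (· ++ [p.1]))
    (PySem.Dict.empty : PySem.Dict String (List String))
  (new_di.foldl (fun result kv =>
    if result.contains kv.1 then result
    else reduzirInner kv.1 kv.2 (groups.getD kv.2 []) result)
    (PySem.Dict.empty : PySem.Dict String String)).items

-- ===== PRECONDITION & SPEC =====
-- Pre_ excludes only association lists with duplicate keys: they encode no Python dict,
-- so A (whose argument is a dict) is never called on them.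
def Pre_reduzir_keys (new_di : List (String × String)) : Prop :=
  (new_di.map Prod.fst).Nodup
instance (new_di : List (String × String)) : Decidable (Pre_reduzir_keys new_di) := by
  unfold Pre_reduzir_keys; infer_instance

def pvWitness_reduzir_keys : (List (String × String)) := [("a", "x"), ("bb", "x"), ("c", "y")]

def Spec_reduzir_keys (new_di : List (String × String)) (out : List (String × String)) : Prop := out = reduzir_keys_alt new_di
instance (new_di : List (String × String)) (out : List (String × String)) : Decidable (Spec_reduzir_keys new_di out) := by unfold Spec_reduzir_keys; infer_instance

-- ===== CLAIM (what is proved, stated in full; the proofs are below) =====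
def Claim_equal_reduzir_keys : Prop := ∀ (new_di : List (String × String)), Dom_reduzir_keys new_di → Pre_reduzir_keys new_di → Spec_reduzir_keys new_di (reduzir_keys new_di)

-- ===== LEMMAS AND PROOFS =====

-- the body of A's inner loop for a fixed outer pair (k, v), acting on one key of v's group
def aKeyStep (k v : String) (d : PySem.Dict String String) (key : String) : PySem.Dict String String :=
  if k ≠ key then
    let ms := menor_string k key
    if d.contains ms.1 || d.contains ms.2 then d
    else d.insert (menor_string k key).1 v
  else d

-- aKeyStep does nothing when one of k, key is already a key of d
theorem aKeyStep_of_contains_either (k v key : String) (d : PySem.Dict String String)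
    (h : d.contains k = true ∨ d.contains key = true) :
    aKeyStep k v d key = d := by
  by_cases hk : k ≠ key
  · simp only [aKeyStep, if_pos hk, menor_string]
    by_cases hlen : PySem.Str.len k < PySem.Str.len key
    · rw [if_pos hlen]
      rcases h with h | h <;> simp [h]
    · rw [if_neg hlen]
      rcases h with h | h <;> simp [h]
  · simp only [aKeyStep, if_neg hk]

-- A's inner full scan = a scan over the keys whose value is v
theorem inner_filter (k v : String) (l : List (String × String)) :
    ∀ d : PySem.Dict String String,
      l.foldl (fun d kv2 =>
        if k ≠ kv2.1 ∧ v = kv2.2 then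
          let ms := menor_string k kv2.1
          if d.contains ms.1 || d.contains ms.2 then d
          else d.insert (menor_string k kv2.1).1 kv2.2
        else d) d
      = ((l.filter (fun p => p.2 == v)).map Prod.fst).foldl (aKeyStep k v) d := by
  induction l with
  | nil => intro d; rfl
  | cons p rest ih =>
    intro d
    obtain ⟨pk, pv⟩ := p
    simp only [List.foldl_cons, List.filter_cons]
    by_cases hv : v = pv
    · subst hv
      rw [if_pos (beq_self_eq_true v), List.map_cons, List.foldl_cons]
      have hstep : (if k ≠ pk ∧ v = v then
          let ms := menor_string k pk
          if d.contains ms.1 || d.contains ms.2 then d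
          else d.insert (menor_string k pk).1 v
        else d) = aKeyStep k v d pk := by
        by_cases hk : k ≠ pk
        · rw [if_pos ⟨hk, rfl⟩]; simp only [aKeyStep, if_pos hk]
        · rw [if_neg (by intro h; exact hk h.1)]; simp only [aKeyStep, if_neg hk]
      rw [hstep, ih]
    · have hb : (pv == v) = false := by simp [Ne.symm hv]
      rw [hb, if_neg (by intro h; exact hv h.2)]
      simp only [Bool.false_eq_true, if_false]
      exact ih d

-- once k itself is in the dict, the rest of A's scan does nothing
theorem aKeyStep_of_contains (k v : String) (keys : List String) :
    ∀ d : PySem.Dict String String, d.contains k = true →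
      keys.foldl (aKeyStep k v) d = d := by
  induction keys with
  | nil => intro d _; rfl
  | cons key rest ih =>
    intro d hd
    rw [List.foldl_cons, aKeyStep_of_contains_either k v key d (Or.inl hd), ih d hd]

-- while k is not yet in the dict, A's scan is exactly Source B's inner loop
theorem aKeyStep_eq_inner (k v : String) (keys : List String) :
    ∀ d : PySem.Dict String String, d.contains k = false →
      keys.foldl (aKeyStep k v) d = reduzirInner k v keys d := by
  induction keys with
  | nil => intro d _; rfl
  | cons key rest ih =>
    intro d hd
    by_cases hk : k = key
    · subst hk
      rw [List.foldl_cons, show aKeyStep k v d k = d by simp [aKeyStep], ih d hd]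
      simp [reduzirInner]
    · have hbeq : (key == k) = false := by simp [Ne.symm hk]
      by_cases hkey : d.contains key = true
      · rw [List.foldl_cons, aKeyStep_of_contains_either k v key d (Or.inr hkey), ih d hd]
        simp [reduzirInner, hbeq, hkey]
      · have hkey' : d.contains key = false := by simpa using hkey
        by_cases hlen : PySem.Str.len k < PySem.Str.len key
        · have hstep : aKeyStep k v d key = d.insert k v := by
            simp only [aKeyStep, if_pos (show k ≠ key from hk), menor_string]
            rw [if_pos hlen]
            simp [hd, hkey']
          rw [List.foldl_cons, hstep,
            aKeyStep_of_contains k v rest _ (PySem.Dict.contains_insert_self _ _ _)]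
          have hlen' : k.length < key.length := by
            simpa [PySem.Str.len] using hlen
          simp [reduzirInner, hbeq, hkey', hlen']
        · have hstep : aKeyStep k v d key = d.insert key v := by
            simp only [aKeyStep, if_pos (show k ≠ key from hk), menor_string]
            rw [if_neg hlen]
            simp [hd, hkey']
          have hins : (d.insert key v).contains k = false := by
            rw [PySem.Dict.contains_insert]
            simp [hk, hd]
          rw [List.foldl_cons, hstep, ih _ hins]
          have hlen' : ¬ k.length < key.length := by
            simpa [PySem.Str.len] using hlen
          simp [reduzirInner, hbeq, hkey', hlen']

-- the groups index holds exactly the keys of value v, in original order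
theorem groups_getD (l : List (String × String)) :
    ∀ (g : PySem.Dict String (List String)) (v : String),
      (l.foldl (fun g p => g.modify p.2 [] (· ++ [p.1])) g).getD v []
        = g.getD v [] ++ (l.filter (fun p => p.2 == v)).map Prod.fst := by
  induction l with
  | nil => intro g v; simp
  | cons p rest ih =>
    intro g v
    by_cases hv : p.2 = v
    · simp [List.foldl_cons, ih, hv]
    · simp [List.foldl_cons, ih, PySem.Dict.getD_modify, hv, Ne.symm hv]

-- ===== VERDICT (by name: the statement is the Claim_ definition above) =====
theorem reduzir_keys_spec : Claim_equal_reduzir_keys := by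
  intro new_di _ _
  unfold Spec_reduzir_keys reduzir_keys reduzir_keys_alt
  have hstep : ∀ (d : PySem.Dict String String) (kv : String × String),
      new_di.foldl (fun d kv2 =>
        if kv.1 ≠ kv2.1 ∧ kv.2 = kv2.2 then
          let ms := menor_string kv.1 kv2.1
          if d.contains ms.1 || d.contains ms.2 then d
          else d.insert (menor_string kv.1 kv2.1).1 kv2.2
        else d) d
      = (if d.contains kv.1 then d
         else reduzirInner kv.1 kv.2
           ((new_di.foldl (fun g p => g.modify p.2 [] (· ++ [p.1]))
             (PySem.Dict.empty : PySem.Dict String (List String))).getD kv.2 []) d) := by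
    intro d kv
    obtain ⟨k, v⟩ := kv
    rw [inner_filter k v new_di d, groups_getD new_di PySem.Dict.empty v]
    by_cases hd : d.contains k = true
    · rw [aKeyStep_of_contains k v _ d hd]
      simp [hd]
    · have hd' : d.contains k = false := by simpa using hd
      rw [aKeyStep_eq_inner k v _ d hd']
      simp [hd', PySem.Dict.getD_empty]
  have hfold : ∀ (l : List (String × String)) (d : PySem.Dict String String),
      l.foldl (fun d kv =>
        new_di.foldl (fun d kv2 =>
          if kv.1 ≠ kv2.1 ∧ kv.2 = kv2.2 then
            let ms := menor_string kv.1 kv2.1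
            if d.contains ms.1 || d.contains ms.2 then d
            else d.insert (menor_string kv.1 kv2.1).1 kv2.2
          else d) d) d
      = l.foldl (fun d kv =>
          if d.contains kv.1 then d
          else reduzirInner kv.1 kv.2
            ((new_di.foldl (fun g p => g.modify p.2 [] (· ++ [p.1]))
              (PySem.Dict.empty : PySem.Dict String (List String))).getD kv.2 []) d) d := by
    intro l
    induction l with
    | nil => intro d; rfl
    | cons kv rest ih =>
      intro d
      rw [List.foldl_cons, List.foldl_cons, hstep d kv, ih]
  exact congrArg PySem.Dict.items (hfold new_di PySem.Dict.empty)
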